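-- pv_equiv track=rewrite | github.com/tylerimpey/Leetcode | leetcode_examples.py | toLowerCase_709
-- ===== SOURCE A (Python) =====
-- def toLowerCase_709(str):
--     """
--     Description
--     -----------
--     Implement function ToLowerCase() that has a string parameter str, and returns the same string in lowercase.
--
--     Parameters
--     ----------
--     :type str:  str
--     :rtype:     str
--     """
--
--     result = ''
--
--     for i in str:
--         if ord(i) < 97 and ord(i) >= 65:
--             result += chr(ord(i) + 32)
--         else:
--             result += i
--
--     return result
-- ===== SOURCE B (Python) =====
-- def toLowerCase_709(str):
--     """
--     Return str lowercased, as the single idiomatic library call.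
--     """
--     return str.lower()
-- ===== Notes on version B (the rewrite author's own statement) =====
-- stated objective: idiomatic
-- what changed: Replaces the explicit per-character loop with ord/chr arithmetic and string concatenation by the single library call str.lower().
-- intended difference: On strings containing a character with code 91-96 ('[', '\\', ']', '^', '_', '`'), A's condition ord(i) < 97 wrongly shifts it by 32 (e.g. '[' -> '{'), while B leaves it unchanged, which is the intended lowercase behaviour. — e.g. on toLowerCase_709("["): A returns "{", B returns "["
import Mathlib
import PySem

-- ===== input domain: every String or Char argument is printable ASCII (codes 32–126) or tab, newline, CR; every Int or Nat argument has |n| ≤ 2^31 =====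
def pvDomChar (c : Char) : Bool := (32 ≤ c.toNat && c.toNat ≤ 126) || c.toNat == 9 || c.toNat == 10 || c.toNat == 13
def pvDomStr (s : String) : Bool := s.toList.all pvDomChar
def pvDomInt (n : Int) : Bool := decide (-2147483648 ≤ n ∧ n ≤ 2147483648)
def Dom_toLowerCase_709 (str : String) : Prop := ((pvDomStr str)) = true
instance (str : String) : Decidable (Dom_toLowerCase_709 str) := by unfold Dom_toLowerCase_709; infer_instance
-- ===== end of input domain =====

-- B replaces A's per-character ord/chr loop by the single library call str.lower();
-- A wrongly also shifts codes 91-96 ('[' .. '`'), stated as the intended difference D_ below.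


-- ===== PORT A =====
-- literal port of A: build `result` left to right, branching on 65 <= ord i < 97
def toLowerCase_709 (str : String) : String :=
  str.toList.foldl
    (fun result i =>
      if i.toNat < 97 ∧ 65 ≤ i.toNat then
        result ++ String.singleton (Char.ofNat (i.toNat + 32))
      else
        result ++ String.singleton i)
    ""

-- ===== PORT B =====
-- literal port of B: the single call str.lower()
def toLowerCase_709_alt (str : String) : String :=
  PySem.Str.lower str

-- ===== PRECONDITION & SPEC =====
-- On strings containing a character with code 91-96 ('[' '\' ']' '^' '_' '`'), A's
-- `ord(i) < 97` branch wrongly shifts it by 32 (e.g. '[' -> '{'); B leaves it unchanged,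
-- which is the intended lowercase behaviour.
def D_toLowerCase_709 (str : String) : Prop :=
  (str.toList.any fun c => decide (91 ≤ c.toNat) && decide (c.toNat ≤ 96)) = true
instance (str : String) : Decidable (D_toLowerCase_709 str) := by
  unfold D_toLowerCase_709; infer_instance

def Spec_toLowerCase_709 (str : String) (out : String) : Prop :=
  ¬ D_toLowerCase_709 str → out = toLowerCase_709_alt str
instance (str : String) (out : String) : Decidable (Spec_toLowerCase_709 str out) := by
  unfold Spec_toLowerCase_709; infer_instance

def pvDiffWitness_toLowerCase_709 : String := "["
def pvDiffWitnessOut_toLowerCase_709 : String × String := ("{", "[")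

-- ===== CLAIM (what is proved, stated in full; the proofs are below) =====
def Claim_unchanged_toLowerCase_709 : Prop :=
  ∀ (str : String), Dom_toLowerCase_709 str → Spec_toLowerCase_709 str (toLowerCase_709 str)
def Claim_changed_toLowerCase_709 : Prop :=
  Dom_toLowerCase_709 (pvDiffWitness_toLowerCase_709) ∧
  D_toLowerCase_709 (pvDiffWitness_toLowerCase_709) ∧
  toLowerCase_709 (pvDiffWitness_toLowerCase_709) = pvDiffWitnessOut_toLowerCase_709.1 ∧
  toLowerCase_709_alt (pvDiffWitness_toLowerCase_709) = pvDiffWitnessOut_toLowerCase_709.2 ∧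
  pvDiffWitnessOut_toLowerCase_709.1 ≠ pvDiffWitnessOut_toLowerCase_709.2
def Claim_exact_toLowerCase_709 : Prop :=
  ∀ (str : String), Dom_toLowerCase_709 str → D_toLowerCase_709 str →
    toLowerCase_709 str ≠ toLowerCase_709_alt str

-- ===== LEMMAS AND PROOFS =====

-- A's per-character function
def pvAstep (i : Char) : Char :=
  if i.toNat < 97 ∧ 65 ≤ i.toNat then Char.ofNat (i.toNat + 32) else i

theorem pvA_foldl (l : List Char) (acc : String) :
    l.foldl
      (fun result i =>
        if i.toNat < 97 ∧ 65 ≤ i.toNat then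
          result ++ String.singleton (Char.ofNat (i.toNat + 32))
        else
          result ++ String.singleton i)
      acc = acc ++ String.ofList (l.map pvAstep) := by
  induction l generalizing acc with
  | nil =>
      apply String.toList_injective
      simp
  | cons c t ih =>
      simp only [List.foldl_cons, List.map_cons, ih, pvAstep]
      split_ifs <;>
        apply String.toList_injective <;>
        simp

theorem pvA_eq (str : String) :
    toLowerCase_709 str = String.ofList (str.toList.map pvAstep) := by
  simpa using pvA_foldl str.toList ""

theorem pvB_eq (str : String) :
    toLowerCase_709_alt str = String.ofList (str.toList.map PySem.Chars.lowerChar) := by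
  rfl

theorem pvStep_eq_of_not_mid (c : Char) (h : ¬ (91 ≤ c.toNat ∧ c.toNat ≤ 96)) :
    pvAstep c = PySem.Chars.lowerChar c := by
  have hA : ('A' ≤ c ∧ c ≤ 'Z') ↔ (65 ≤ c.toNat ∧ c.toNat ≤ 90) := by
    constructor
    · rintro ⟨h1, h2⟩; exact ⟨h1, h2⟩
    · rintro ⟨h1, h2⟩; exact ⟨h1, h2⟩
  simp only [pvAstep, PySem.Chars.lowerChar, PySem.Chars.isupper,
    Bool.and_eq_true, decide_eq_true_eq]
  split_ifs with h1 h2 h2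
  · rfl
  · exact absurd (hA.mpr ⟨h1.2, by omega⟩) (by simpa using h2)
  · obtain ⟨hc1, hc2⟩ := hA.mp (by simpa using h2)
    exact absurd ⟨by omega, hc1⟩ h1
  · rfl

theorem pvStep_ne_of_mid (c : Char) (h : 91 ≤ c.toNat ∧ c.toNat ≤ 96) :
    pvAstep c ≠ PySem.Chars.lowerChar c := by
  have hval : (c.toNat + 32).isValidChar := by
    left; omega
  have hup : PySem.Chars.isupper c = false := by
    simp only [PySem.Chars.isupper, Bool.and_eq_false_iff, decide_eq_false_iff_not]
    right
    show ¬ (c.toNat ≤ 90)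
    omega
  simp only [pvAstep, PySem.Chars.lowerChar, hup,
    if_pos (show c.toNat < 97 ∧ 65 ≤ c.toNat by omega)]
  intro heq
  have h2 : (Char.ofNat (c.toNat + 32)).toNat = c.toNat := by
    rw [heq]; simp
  rw [show (Char.ofNat (c.toNat + 32)).toNat = c.toNat + 32 by simp [Char.ofNat, hval]] at h2
  omega

-- ===== VERDICT (by name: the statement is the Claim_ definition above) =====
theorem toLowerCase_709_spec : Claim_unchanged_toLowerCase_709 := by
  intro str _ hnd
  rw [pvA_eq, pvB_eq]
  congr 1
  apply List.map_congr_left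
  intro c hc
  apply pvStep_eq_of_not_mid
  intro hmid
  refine hnd ?_
  unfold D_toLowerCase_709
  rw [List.any_eq_true]
  exact ⟨c, hc, by simp [hmid.1, hmid.2]⟩

theorem toLowerCase_709_changed : Claim_changed_toLowerCase_709 := by
  unfold Claim_changed_toLowerCase_709
  exact ⟨by rfl,
    by rw [show D_toLowerCase_709 pvDiffWitness_toLowerCase_709 =
            ((['['].any fun c => decide (91 ≤ c.toNat) && decide (c.toNat ≤ 96)) = true) from rfl]; decide,
    by rfl, by rfl,
    by show ("{" : String) ≠ "["; simp⟩

theorem toLowerCase_709_tight : Claim_exact_toLowerCase_709 := by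
  intro str _ hd heq
  obtain ⟨c, hc, hmid'⟩ := List.any_eq_true.mp hd
  have hmid : 91 ≤ c.toNat ∧ c.toNat ≤ 96 := by simpa using hmid'
  rw [pvA_eq, pvB_eq] at heq
  have hmaps : str.toList.map pvAstep = str.toList.map PySem.Chars.lowerChar := by
    simpa using congrArg String.toList heq
  exact pvStep_ne_of_mid c hmid ((List.map_eq_map_iff.mp hmaps) c hc)
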